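-- pv_equiv track=rewrite | github.com/bchwast/AGH-WDI | Kolokwia 17_18/k1_grB_ex1.py | suma_fib
-- ===== SOURCE A (Python) =====
-- def suma_fib(num):
--     f1 = 1
--     f2 = 1
--     while f1 <= num//2 + 1:
--         a1 = f1
--         a2 = f2
--         sum = 0
--         while sum <= num:
--             if sum == num:
--                 return True
--             sum += a1
--             temp = a1
--             a1 = a2
--             a2 += temp
--         #end while
--         temp = f1
--         f1 = f2
--         f2 += temp
--
--     #end while
--     return False
-- ===== SOURCE B (Python) =====
-- def suma_fib(num):
--     # Prefix sums of the Fibonacci numbers (1, 1, 2, 3, ...) not exceeding num,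
--     # plus a set lookup: num is a sum of consecutive Fibonacci numbers exactly
--     # when num is a difference of two prefix sums.
--     if num < 0:
--         return False
--     pref = [0]
--     s = 0
--     a, b = 1, 1
--     while a <= num:
--         s += a
--         pref.append(s)
--         a, b = b, a + b
--     sums = set(pref)
--     return any(p + num in sums for p in pref)
-- ===== Notes on version B (the rewrite author's own statement) =====
-- stated objective: simpler
-- what changed: A regenerates the Fibonacci sequence from every candidate start and re-sums each window in a nested loop; B builds the prefix sums of the Fibonacci numbers up to num once and answers with a set-membership test (num is a consecutive-Fibonacci sum iff it is a difference of two prefix sums), removing the nested rescan.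
import Mathlib
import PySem

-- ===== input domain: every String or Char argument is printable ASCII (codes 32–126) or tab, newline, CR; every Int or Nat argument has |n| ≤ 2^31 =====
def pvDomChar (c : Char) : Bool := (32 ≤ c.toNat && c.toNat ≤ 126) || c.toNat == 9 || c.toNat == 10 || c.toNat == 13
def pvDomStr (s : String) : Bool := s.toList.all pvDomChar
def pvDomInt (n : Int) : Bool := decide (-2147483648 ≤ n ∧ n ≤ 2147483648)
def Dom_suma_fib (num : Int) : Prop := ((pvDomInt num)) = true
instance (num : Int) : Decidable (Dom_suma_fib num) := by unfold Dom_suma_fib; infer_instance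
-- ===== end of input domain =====

-- B replaces A's nested rescan (regenerate Fibonacci from each start, re-sum each window)
-- by one pass building the prefix sums of the Fibonacci numbers ≤ num plus a set-difference
-- membership test; objective: simpler.

-- ===== PORT A =====
-- A's inner 'while sum <= num' loop; fuel only bounds the iteration count (the guard
-- exits first: sum strictly increases each pass), it changes no computed value.
def pvInnerA (num : Int) (a1 a2 s : Int) : Nat → Bool
  | 0 => false
  | f+1 =>
    if s ≤ num then
      if s = num then true
      else pvInnerA num a2 (a2 + a1) (s + a1) f
    else false

-- A's outer 'while f1 <= num//2 + 1' loop, same fuel remark.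
def pvOuterA (num : Int) (f1 f2 : Int) : Nat → Bool
  | 0 => false
  | f+1 =>
    if f1 ≤ PySem.Int.floordiv num 2 + 1 then
      if pvInnerA num f1 f2 0 (num.toNat + 2) then true
      else pvOuterA num f2 (f2 + f1) f
    else false

def suma_fib (num : Int) : Bool := pvOuterA num 1 1 (2 * num.toNat + 3)

-- ===== PORT B =====
-- B's 'while a <= num' loop appending prefix sums; fuel is an ample bound only.
def pvBuildB (num : Int) (a b s : Int) (pref : List Int) : Nat → List Int
  | 0 => pref
  | f+1 =>
    if a ≤ num then pvBuildB num b (a + b) (s + a) (pref ++ [s + a]) f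
    else pref

def suma_fib_alt (num : Int) : Bool :=
  if num < 0 then false
  else
    let pref := pvBuildB num 1 1 0 [0] (2 * num.toNat + 3)
    let sums : PySem.Set Int := PySem.Set.ofList pref
    pref.any (fun p => PySem.Set.contains sums (p + num))

-- ===== PRECONDITION & SPEC =====
def Spec_suma_fib (num : Int) (out : Bool) : Prop := out = suma_fib_alt num
instance (num : Int) (out : Bool) : Decidable (Spec_suma_fib num out) := by unfold Spec_suma_fib; infer_instance

-- ===== CLAIM (what is proved, stated in full; the proofs are below) =====
def Claim_equal_suma_fib : Prop := ∀ (num : Int), Dom_suma_fib num → Spec_suma_fib num (suma_fib num)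

-- ===== LEMMAS AND PROOFS =====

-- The Fibonacci sequence both programs walk: 1, 1, 2, 3, 5, …
def pvF : Nat → Int
  | 0 => 1
  | 1 => 1
  | n+2 => pvF n + pvF (n+1)

-- Sum of the window of k consecutive Fibonacci numbers starting at index i.
def pvW (i : Nat) : Nat → Int
  | 0 => 0
  | k+1 => pvF i + pvW (i+1) k

theorem pvF_pos (n : Nat) : 1 ≤ pvF n := by
  induction n using pvF.induct with
  | case1 => simp [pvF]
  | case2 => simp [pvF]
  | case3 n h1 h2 => simp only [pvF]; omega

theorem pvF_le_succ (n : Nat) : pvF n ≤ pvF (n+1) := by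
  cases n with
  | zero => simp [pvF]
  | succ m => have := pvF_pos m; simp only [pvF]; omega

theorem pvF_mono {m n : Nat} (h : m ≤ n) : pvF m ≤ pvF n := by
  induction n with
  | zero => have : m = 0 := Nat.le_zero.mp h; simp [this]
  | succ k ih =>
    rcases Nat.lt_or_ge m (k+1) with h' | h'
    · exact le_trans (ih (by omega)) (pvF_le_succ k)
    · have : m = k+1 := by omega
      simp [this]

theorem pvW_nonneg (k : Nat) : ∀ i, 0 ≤ pvW i k := by
  induction k with
  | zero => intro i; simp [pvW]
  | succ k ih => intro i; have := pvF_pos i; simp only [pvW]; have := ih (i+1); omega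

theorem pvF_le_W (k : Nat) : ∀ i t, i ≤ t → t < i + k → pvF t ≤ pvW i k := by
  induction k with
  | zero => intro i t h1 h2; omega
  | succ k ih =>
    intro i t h1 h2
    rcases Nat.eq_or_lt_of_le h1 with rfl | h'
    · have := pvW_nonneg k (i+1); simp only [pvW]; omega
    · have := ih (i+1) t (by omega) (by omega)
      have := pvF_pos i; simp only [pvW]; omega

theorem pvW_add (k : Nat) : ∀ i l, pvW i (k + l) = pvW i k + pvW (i + k) l := by
  induction k with
  | zero => intro i l; simp [pvW]
  | succ k ih =>
    intro i l
    have h1 : k + 1 + l = (k + l) + 1 := by omega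
    have h2 : i + (k + 1) = (i + 1) + k := by omega
    rw [h1]
    simp only [pvW, h2, ih (i+1) l]
    ring

theorem pvW_succ_right (i k : Nat) : pvW i (k+1) = pvW i k + pvF (i+k) := by
  have := pvW_add k i 1
  simpa [pvW] using this

theorem pvW_prefix (i l : Nat) : pvW 0 (i + l) = pvW 0 i + pvW i l := by
  simpa using pvW_add i 0 l

-- ===== A-side characterisation =====

theorem pvInnerA_iff (num : Int) :
    ∀ (fuel : Nat) (i : Nat) (s : Int), (num - s).toNat < fuel →
      (pvInnerA num (pvF i) (pvF (i+1)) s fuel = true ↔ ∃ k, s + pvW i k = num) := by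
  intro fuel
  induction fuel with
  | zero => intro i s h; omega
  | succ f ih =>
    intro i s h
    simp only [pvInnerA]
    by_cases hs : s ≤ num
    · simp only [hs, if_true]
      by_cases he : s = num
      · simp only [he, if_true]
        constructor
        · intro _; exact ⟨0, by simp [pvW]⟩
        · intro _; trivial
      · simp only [he, if_false]
        have hF2 : pvF (i+1) + pvF i = pvF (i+2) := by simp only [pvF]; ring
        have hrec := ih (i+1) (s + pvF i) (by have := pvF_pos i; omega)
        rw [hF2] at *
        rw [show pvF (i+1+1) = pvF (i+2) from rfl] at hrec
        rw [hrec]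
        constructor
        · rintro ⟨k, hk⟩; exact ⟨k+1, by simp only [pvW]; omega⟩
        · rintro ⟨k, hk⟩
          cases k with
          | zero => exfalso; simp [pvW] at hk; omega
          | succ k' => exact ⟨k', by simp only [pvW] at hk; omega⟩
    · simp only [hs, if_false]
      constructor
      · intro h'; cases h'
      · rintro ⟨k, hk⟩; have := pvW_nonneg k i; omega

-- the outer guard bound num//2 + 1
def pvC (num : Int) : Int := PySem.Int.floordiv num 2 + 1

theorem pvOuterA_iff (num : Int) :
    ∀ (fuel : Nat) (i : Nat),
      ((pvC num + 1 - pvF i).toNat + (pvC num + 1 - pvF (i+1)).toNat < fuel) →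
      (pvOuterA num (pvF i) (pvF (i+1)) fuel = true ↔
        ∃ j, i ≤ j ∧ pvF j ≤ pvC num ∧ ∃ k, pvW j k = num) := by
  intro fuel
  induction fuel with
  | zero => intro i h; omega
  | succ f ih =>
    intro i h
    simp only [pvOuterA]
    rw [show PySem.Int.floordiv num 2 + 1 = pvC num from rfl]
    by_cases hg : pvF i ≤ pvC num
    · simp only [hg, if_true]
      have hinner := pvInnerA_iff num (num.toNat + 2) i 0 (by omega)
      by_cases hin : pvInnerA num (pvF i) (pvF (i+1)) 0 (num.toNat + 2) = true
      · simp only [hin, if_true]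
        constructor
        · intro _
          obtain ⟨k, hk⟩ := hinner.mp hin
          exact ⟨i, le_refl i, hg, k, by simpa using hk⟩
        · intro _; trivial
      · rw [if_neg hin]
        have hF2 : pvF (i+1) + pvF i = pvF (i+1+1) := by
          rw [show i+1+1 = i+2 from rfl]; simp only [pvF]; ring
        have hfuel : (pvC num + 1 - pvF (i+1)).toNat + (pvC num + 1 - pvF (i+1+1)).toNat < f := by
          clear hinner hin
          have h2 : pvF (i+1+1) = pvF i + pvF (i+1) := by
            rw [show i+1+1 = i+2 from rfl]; simp only [pvF]
          have := pvF_pos i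
          have := pvF_pos (i+1)
          omega
        have hrec := ih (i+1) hfuel
        rw [hF2, hrec]
        constructor
        · rintro ⟨j, hij, hj, k, hk⟩; exact ⟨j, by omega, hj, k, hk⟩
        · rintro ⟨j, hij, hj, k, hk⟩
          rcases Nat.eq_or_lt_of_le hij with rfl | h'
          · exfalso
            exact hin (hinner.mpr ⟨k, by rw [zero_add]; exact hk⟩)
          · exact ⟨j, by omega, hj, k, hk⟩
    · rw [if_neg hg]
      constructor
      · intro h'; exact absurd h' (by simp)
      · rintro ⟨j, hij, hj, k, hk⟩
        exact ((hg (le_trans (pvF_mono hij) hj)).elim)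

theorem sumaA_iff (num : Int) :
    suma_fib num = true ↔ ∃ j, pvF j ≤ pvC num ∧ ∃ k, pvW j k = num := by
  have hdiv : PySem.Int.floordiv num 2 = num / 2 := PySem.Int.floordiv_eq_ediv_of_pos (by omega)
  have hfuel : (pvC num + 1 - pvF 0).toNat + (pvC num + 1 - pvF 1).toNat < 2 * num.toNat + 3 := by
    simp only [pvC, hdiv, pvF]; omega
  have := pvOuterA_iff num (2 * num.toNat + 3) 0 hfuel
  rw [show pvF 0 = 1 from rfl, show pvF 1 = 1 from rfl] at this
  rw [show suma_fib num = pvOuterA num 1 1 (2 * num.toNat + 3) from rfl, this]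
  constructor
  · rintro ⟨j, _, hj, hk⟩; exact ⟨j, hj, hk⟩
  · rintro ⟨j, hj, hk⟩; exact ⟨j, Nat.zero_le j, hj, hk⟩

-- any representation yields one whose start passes A's num//2 + 1 bound
theorem pvRep_bounded (num : Int) (h : ∃ j k, pvW j k = num) :
    ∃ j, pvF j ≤ pvC num ∧ ∃ k, pvW j k = num := by
  have hdiv : PySem.Int.floordiv num 2 = num / 2 := PySem.Int.floordiv_eq_ediv_of_pos (by omega)
  obtain ⟨j, k, hk⟩ := h
  have hbig : ∀ j', pvW j' 2 ≤ num → pvW j' 2 = num → ∃ j, pvF j ≤ pvC num ∧ ∃ k, pvW j k = num := by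
    intro j' hle he
    refine ⟨j', ?_, 2, he⟩
    have h1 := pvF_le_succ j'
    have h2 : pvW j' 2 = pvF j' + pvF (j'+1) := by simp [pvW]
    simp only [pvC, hdiv]
    omega
  match k, hk with
  | 0, hk =>
    refine ⟨0, ?_, 0, hk⟩
    have : (0:Int) ≤ num := by simp [pvW] at hk; omega
    simp only [pvC, hdiv]
    have := pvF_pos 0
    simp only [show pvF 0 = 1 from rfl]
    omega
  | 1, hk =>
    match j, hk with
    | 0, hk =>
      have hnum : num = 1 := by simpa [pvW, pvF] using hk.symm
      refine ⟨0, ?_, 1, hk⟩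
      rw [pvC, hdiv, hnum]; decide
    | 1, hk =>
      have hnum : num = 1 := by simpa [pvW, pvF] using hk.symm
      refine ⟨1, ?_, 1, hk⟩
      rw [pvC, hdiv, hnum]; decide
    | j'+2, hk =>
      apply hbig j'
      · have h2 : pvW j' 2 = pvF (j'+2) := by simp [pvW, pvF]
        simp only [pvW] at hk
        omega
      · have h2 : pvW j' 2 = pvF (j'+2) := by simp [pvW, pvF]
        simp only [pvW] at hk
        omega
  | k'+2, hk =>
    refine ⟨j, ?_, k'+2, hk⟩
    have hsplit : pvW j (2 + k') = pvW j 2 + pvW (j+2) k' := pvW_add 2 j k'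
    have h2 : pvW j 2 = pvF j + pvF (j+1) := by simp [pvW]
    have h3 := pvW_nonneg k' (j+2)
    have h4 := pvF_le_succ j
    have h5 : (2:Nat) + k' = k' + 2 := by omega
    rw [h5] at hsplit
    simp only [pvC, hdiv]
    omega

-- ===== B-side characterisation =====

theorem pvBuildB_spec (num : Int) :
    ∀ (fuel : Nat) (i : Nat) (pref : List Int),
      ((num + 1 - pvF i).toNat + (num + 1 - pvF (i+1)).toNat < fuel) →
      ∃ M, i ≤ M ∧ (∀ t, i ≤ t → t < M → pvF t ≤ num) ∧ num < pvF M ∧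
        pvBuildB num (pvF i) (pvF (i+1)) (pvW 0 i) pref fuel =
          pref ++ (List.range' i (M - i)).map (fun j => pvW 0 (j+1)) := by
  intro fuel
  induction fuel with
  | zero => intro i pref h; omega
  | succ f ih =>
    intro i pref h
    simp only [pvBuildB]
    by_cases hg : pvF i ≤ num
    · simp only [hg, if_true]
      have hF2 : pvF i + pvF (i+1) = pvF (i+1+1) := by
        rw [show i+1+1 = i+2 from rfl]; simp only [pvF]
      have hS : pvW 0 i + pvF i = pvW 0 (i+1) := by
        have := pvW_succ_right 0 i; simp at this; omega
      have hfuel : (num + 1 - pvF (i+1)).toNat + (num + 1 - pvF (i+1+1)).toNat < f := by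
        have h2 : pvF (i+1+1) = pvF i + pvF (i+1) := by
          rw [show i+1+1 = i+2 from rfl]; simp only [pvF]
        have := pvF_pos i
        have := pvF_pos (i+1)
        omega
      obtain ⟨M, hM1, hM2, hM3, hM4⟩ := ih (i+1) (pref ++ [pvW 0 (i+1)]) hfuel
      refine ⟨M, by omega, ?_, hM3, ?_⟩
      · intro t h1 h2
        rcases Nat.eq_or_lt_of_le h1 with rfl | h'
        · exact hg
        · exact hM2 t (by omega) h2
      · rw [hF2, hS]
        rw [hM4]
        have hr : List.range' i (M - i) = i :: List.range' (i+1) (M - (i+1)) := by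
          rw [show M - i = (M - (i+1)) + 1 from by omega]
          rfl
        rw [hr]
        simp
    · simp only [hg, if_false]
      refine ⟨i, le_refl i, by omega, by omega, ?_⟩
      simp

-- membership description of B's prefix list
theorem pvPref_mem (num : Int) :
    ∃ M, (∀ t, t < M → pvF t ≤ num) ∧ num < pvF M ∧
      ∀ p, p ∈ pvBuildB num 1 1 0 [0] (2 * num.toNat + 3) ↔ ∃ i, i ≤ M ∧ p = pvW 0 i := by
  have hfuel : (num + 1 - pvF 0).toNat + (num + 1 - pvF 1).toNat < 2 * num.toNat + 3 := by
    simp only [pvF]; omega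
  obtain ⟨M, _, hM2, hM3, hM4⟩ := pvBuildB_spec num (2 * num.toNat + 3) 0 [0] hfuel
  refine ⟨M, fun t ht => hM2 t (Nat.zero_le t) ht, hM3, ?_⟩
  intro p
  simp only [show pvF 0 = 1 from rfl, show pvF (0+1) = 1 from rfl,
      show pvW 0 0 = 0 from rfl] at hM4
  rw [hM4]
  simp only [List.mem_append, List.mem_map, List.mem_singleton, List.mem_range'_1]
  constructor
  · rintro (h | ⟨j, ⟨hj1, hj2⟩, rfl⟩)
    · exact ⟨0, Nat.zero_le M, by simpa [pvW] using h⟩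
    · exact ⟨j+1, by omega, rfl⟩
  · rintro ⟨i, hi, rfl⟩
    cases i with
    | zero => left; simp [pvW]
    | succ i' => right; exact ⟨i', ⟨by omega, by omega⟩, rfl⟩

theorem sumaB_iff (num : Int) (h0 : 0 ≤ num) :
    suma_fib_alt num = true ↔ ∃ j k, pvW j k = num := by
  obtain ⟨M, hM1, hM2, hmem⟩ := pvPref_mem num
  rw [show suma_fib_alt num =
      ((pvBuildB num 1 1 0 [0] (2 * num.toNat + 3)).any
        (fun p => PySem.Set.contains (PySem.Set.ofList (pvBuildB num 1 1 0 [0] (2 * num.toNat + 3))) (p + num)))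
      from by simp [suma_fib_alt, not_lt.mpr h0]]
  rw [List.any_eq_true]
  constructor
  · rintro ⟨p, hp, hc⟩
    have hc' : p + num ∈ pvBuildB num 1 1 0 [0] (2 * num.toNat + 3) := by
      have := (PySem.Set.contains_iff (PySem.Set.ofList (pvBuildB num 1 1 0 [0] (2 * num.toNat + 3))) (p + num)).mp hc
      exact (PySem.Set.mem_ofList _ _).mp this
    obtain ⟨i, hi, rfl⟩ := hmem p |>.mp hp
    obtain ⟨j, hj, hq⟩ := hmem _ |>.mp hc'
    rcases Nat.le_total i j with hij | hij
    · refine ⟨i, j - i, ?_⟩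
      have h3 : pvW 0 (i + (j - i)) = pvW 0 i + pvW i (j - i) := pvW_prefix i (j - i)
      rw [show i + (j - i) = j from by omega] at h3
      omega
    · -- j ≤ i : then num = -(pvW j (i-j)) ≤ 0, so num = 0
      have h3 : pvW 0 (j + (i - j)) = pvW 0 j + pvW j (i - j) := pvW_prefix j (i - j)
      rw [show j + (i - j) = i from by omega] at h3
      have h4 := pvW_nonneg (i - j) j
      have hz : num = 0 := by omega
      exact ⟨0, 0, by simp [pvW, hz]⟩
  · rintro ⟨j, k, hk⟩
    cases k with
    | zero =>
      have hz : num = 0 := by simpa [pvW] using hk.symm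
      refine ⟨0, ?_, ?_⟩
      · exact (hmem 0).mpr ⟨0, Nat.zero_le M, rfl⟩
      · rw [PySem.Set.contains_iff, PySem.Set.mem_ofList]
        exact (hmem (0 + num)).mpr ⟨0, Nat.zero_le M, by simp [pvW, hz]⟩
    | succ k' =>
      have hlt : j + k' < M := by
        by_contra hge
        have h1 : pvF M ≤ pvF (j + k') := pvF_mono (by omega)
        have h2 : pvF (j + k') ≤ pvW j (k'+1) := pvF_le_W (k'+1) j (j + k') (by omega) (by omega)
        omega
      have hsplit : pvW 0 (j + (k'+1)) = pvW 0 j + pvW j (k'+1) := pvW_prefix j (k'+1)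
      refine ⟨pvW 0 j, ?_, ?_⟩
      · exact (hmem _).mpr ⟨j, by omega, rfl⟩
      · rw [PySem.Set.contains_iff, PySem.Set.mem_ofList]
        exact (hmem _).mpr ⟨j + (k'+1), by omega, by omega⟩

-- ===== VERDICT (by name: the statement is the Claim_ definition above) =====
theorem suma_fib_spec : Claim_equal_suma_fib := by
  intro num _
  unfold Spec_suma_fib
  rcases lt_or_ge num 0 with hneg | h0
  · have hdiv : PySem.Int.floordiv num 2 = num / 2 := PySem.Int.floordiv_eq_ediv_of_pos (by omega)
    have hA : suma_fib num = false := by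
      rw [show suma_fib num = pvOuterA num 1 1 (2 * num.toNat + 3) from rfl]
      rw [show 2 * num.toNat + 3 = (2 * num.toNat + 2) + 1 from by omega]
      simp only [pvOuterA]
      rw [if_neg (by rw [hdiv]; omega)]
    have hB : suma_fib_alt num = false := by simp [suma_fib_alt, hneg]
    rw [hA, hB]
  · have hA := sumaA_iff num
    have hB := sumaB_iff num h0
    apply Bool.eq_iff_iff.mpr
    rw [hA, hB]
    constructor
    · rintro ⟨j, _, k, hk⟩; exact ⟨j, k, hk⟩
    · intro h; exact pvRep_bounded num h
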